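-- pv_equiv track=rewrite | github.com/eki-project/finn-plus | src/finn/transformation/fpgadataflow/set_fifo_depths.py | get_fifo_split_configs
-- ===== SOURCE A (Python) =====
-- def get_fifo_split_configs(depth, max_qsrl_depth=256, max_vivado_depth=32768):
--     """Break non-power-of-2 sized FIFO depths into several ones"""
--
--     def floor_pow2(x):
--         if (x & (x - 1) == 0) and x != 0:
--             return x
--         else:
--             return 1 << ((x - 1).bit_length() - 1)
--
--     def decompose_pow2(x):
--         if x <= max_qsrl_depth:
--             return [x]
--         else:
--             r = floor_pow2(x)
--             if x == r:
--                 return [x]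
--             else:
--                 return [r, *decompose_pow2(x - r)]
--
--     ret = []
--     # trivial case: for small FIFOs, return as-is with rtl style
--     if depth <= max_qsrl_depth:
--         return [(depth, "rtl")]
--     # first pass: ensure max depth is respected
--     # (restricted by Vivado AXIS infra IP)
--     remainder = depth
--     while remainder != 0:
--         if remainder > max_vivado_depth:
--             ret.append(max_vivado_depth)
--             remainder -= max_vivado_depth
--         else:
--             ret.append(remainder)
--             remainder = 0
--     # second pass: break non-power-of-2 sized FIFOs
--     # into several ones
--
--     ret_pass2 = list(map(decompose_pow2, ret))
--     # unpack list of lists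
--     ret_pass2 = [x for dec_list in ret_pass2 for x in dec_list]
--
--     # finally, add impl_style to each split FIFO
--     ret_final = []
--     for cand_depth in ret_pass2:
--         if cand_depth <= max_qsrl_depth:
--             ret_final.append((max(2, cand_depth), "rtl"))
--         else:
--             ret_final.append((cand_depth, "vivado"))
--
--     return ret_final
-- ===== SOURCE B (Python) =====
-- def get_fifo_split_configs(depth, max_qsrl_depth=256, max_vivado_depth=32768):
--     """Break non-power-of-2 sized FIFO depths into several ones"""
--     if depth <= max_qsrl_depth:
--         return [(depth, "rtl")]
--
--     def floor_pow2(x):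
--         if (x & (x - 1) == 0) and x != 0:
--             return x
--         return 1 << ((x - 1).bit_length() - 1)
--
--     def label(d):
--         return (max(2, d), "rtl") if d <= max_qsrl_depth else (d, "vivado")
--
--     nfull, rem = divmod(depth, max_vivado_depth)
--     blocks = [max_vivado_depth] * nfull + ([rem] if rem != 0 else [])
--     out = []
--     for x in blocks:
--         while x > max_qsrl_depth:
--             r = floor_pow2(x)
--             if r == x:
--                 break
--             out.append(label(r))
--             x -= r
--         out.append(label(x))
--     return out
-- ===== Notes on version B (the rewrite author's own statement) =====
-- stated objective: simpler
-- what changed: B computes the Vivado-sized blocks with a single divmod instead of A's subtraction loop, and replaces A's recursive decompose_pow2 + map + list-flattening + separate labelling pass by one fused iterative while-loop that emits already-labelled entries.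
-- outside the precondition, e.g. on get_fifo_split_configs(-3, -10, 5): A returns [(4, 'vivado'), (8, 'vivado'), (2, 'rtl')], B returns [(2, 'vivado')]; on get_fifo_split_configs(0, -1, 0): A returns [], B raises ZeroDivisionError
import Mathlib
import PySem

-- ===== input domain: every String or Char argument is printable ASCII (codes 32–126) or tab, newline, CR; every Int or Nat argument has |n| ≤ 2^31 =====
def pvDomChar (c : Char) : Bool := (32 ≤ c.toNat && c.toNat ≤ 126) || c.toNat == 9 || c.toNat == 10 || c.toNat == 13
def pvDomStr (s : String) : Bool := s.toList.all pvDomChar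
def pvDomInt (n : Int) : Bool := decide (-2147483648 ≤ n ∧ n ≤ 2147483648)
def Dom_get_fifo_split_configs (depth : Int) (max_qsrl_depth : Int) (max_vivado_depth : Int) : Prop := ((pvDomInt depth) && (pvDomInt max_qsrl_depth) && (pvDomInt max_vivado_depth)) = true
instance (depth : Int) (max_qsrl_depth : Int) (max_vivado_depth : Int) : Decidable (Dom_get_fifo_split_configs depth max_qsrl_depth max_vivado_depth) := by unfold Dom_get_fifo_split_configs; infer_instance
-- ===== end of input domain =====

-- B replaces A's chunking loop by divmod and A's recursion+map+flatten+label pass by one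
-- fused iterative loop (same return value on Pre_; objective: simpler decomposition).

-- shared helper: Python's floor_pow2 (both Source A and Source B contain this identical helper).
-- Exact except at x ≤ 0, where Python's `1 << ((x-1).bit_length()-1)` raises ValueError
-- at x ∈ {0}; on Pre_ it is only ever applied to x ≥ 1 (see Pre_ comment).
def pvFloorPow2 (x : Int) : Int :=
  if PySem.Int.band x (x - 1) = 0 ∧ x ≠ 0 then x
  else (1 : Int) <<< (PySem.Int.bitLength (x - 1) - 1)

-- ===== PORT A =====
-- decompose_pow2, fueled recursion (fuel only makes the recursion total; never exhausted on Pre_)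
def pvDecA (mq : Int) : Nat → Int → List Int
  | 0, x => [x]
  | n+1, x =>
    if x ≤ mq then [x]
    else
      let r := pvFloorPow2 x
      if x = r then [x] else r :: pvDecA mq n (x - r)

-- the `while remainder != 0` chunking loop, fueled (fuel never exhausted on Pre_)
def pvChunkA (mv : Int) : Nat → Int → List Int
  | 0, _ => []
  | n+1, r =>
    if r = 0 then []
    else if r > mv then mv :: pvChunkA mv n (r - mv)
    else [r]

def get_fifo_split_configs (depth : Int) (max_qsrl_depth : Int) (max_vivado_depth : Int) : List (Int × String) :=
  if depth ≤ max_qsrl_depth then [(depth, "rtl")]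
  else
    let ret := pvChunkA max_vivado_depth (depth.toNat + 1) depth
    let ret_pass2 := (ret.map (fun x => pvDecA max_qsrl_depth (x.toNat + 1) x)).flatten
    ret_pass2.foldl (fun acc cd =>
      acc ++ [if cd ≤ max_qsrl_depth then (max 2 cd, "rtl") else (cd, "vivado")]) []

-- ===== PORT B =====
def pvLabel (mq : Int) (d : Int) : Int × String :=
  if d ≤ mq then (max 2 d, "rtl") else (d, "vivado")

-- Source B's `while x > max_qsrl_depth` inner loop, fueled (fuel never exhausted on Pre_)
def pvLoopB (mq : Int) : Nat → Int → List (Int × String)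
  | 0, x => [pvLabel mq x]
  | n+1, x =>
    if x > mq then
      let r := pvFloorPow2 x
      if r = x then [pvLabel mq x]
      else pvLabel mq r :: pvLoopB mq n (x - r)
    else [pvLabel mq x]

def get_fifo_split_configs_alt (depth : Int) (max_qsrl_depth : Int) (max_vivado_depth : Int) : List (Int × String) :=
  if depth ≤ max_qsrl_depth then [(depth, "rtl")]
  else
    match PySem.Int.divmod? depth max_vivado_depth with
    | none => []   -- max_vivado_depth = 0: Python B raises ZeroDivisionError here (outside Pre_)
    | some (nfull, rem) =>
      let blocks := List.replicate nfull.toNat max_vivado_depth ++ (if rem ≠ 0 then [rem] else [])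
      blocks.foldl (fun acc x => acc ++ pvLoopB max_qsrl_depth (x.toNat + 1) x) []

-- ===== PRECONDITION & SPEC =====
-- Pre_ restricts the non-trivial branch (depth > max_qsrl_depth) to the natural domain
-- depth ≥ 0 and max_vivado_depth ≥ 1: outside it A's chunk loop diverges (max_vivado_depth ≤ 0
-- with depth > max_vivado_depth), or A bit-twiddles a NEGATIVE FIFO depth into meaningless
-- splits, where B (divmod-based) either returns a different split or raises ZeroDivisionError.
def Pre_get_fifo_split_configs (depth : Int) (max_qsrl_depth : Int) (max_vivado_depth : Int) : Prop :=
  depth ≤ max_qsrl_depth ∨ (0 ≤ depth ∧ 1 ≤ max_vivado_depth)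
instance (depth : Int) (max_qsrl_depth : Int) (max_vivado_depth : Int) : Decidable (Pre_get_fifo_split_configs depth max_qsrl_depth max_vivado_depth) := by unfold Pre_get_fifo_split_configs; infer_instance

def pvWitness_get_fifo_split_configs : Int × Int × Int := (300, 256, 32768)

def Spec_get_fifo_split_configs (depth : Int) (max_qsrl_depth : Int) (max_vivado_depth : Int) (out : List (Int × String)) : Prop := out = get_fifo_split_configs_alt depth max_qsrl_depth max_vivado_depth
instance (depth : Int) (max_qsrl_depth : Int) (max_vivado_depth : Int) (out : List (Int × String)) : Decidable (Spec_get_fifo_split_configs depth max_qsrl_depth max_vivado_depth out) := by unfold Spec_get_fifo_split_configs; infer_instance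

-- ===== CLAIM (what is proved, stated in full; the proofs are below) =====
def Claim_equal_get_fifo_split_configs : Prop := ∀ (depth : Int) (max_qsrl_depth : Int) (max_vivado_depth : Int), Dom_get_fifo_split_configs depth max_qsrl_depth max_vivado_depth → Pre_get_fifo_split_configs depth max_qsrl_depth max_vivado_depth → Spec_get_fifo_split_configs depth max_qsrl_depth max_vivado_depth (get_fifo_split_configs depth max_qsrl_depth max_vivado_depth)

-- ===== LEMMAS AND PROOFS =====

-- B's fused emit-loop is A's decompose_pow2 followed by the labelling pass (any equal fuel).
theorem pvLoopB_eq_map_dec (mq : Int) : ∀ (n : Nat) (x : Int),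
    pvLoopB mq n x = (pvDecA mq n x).map (pvLabel mq) := by
  intro n
  induction n with
  | zero => intro x; simp [pvLoopB, pvDecA]
  | succ n ih =>
    intro x
    by_cases hx : x ≤ mq
    · simp [pvLoopB, pvDecA, hx, not_lt.mpr hx]
    · by_cases hr : x = pvFloorPow2 x
      · simp [pvLoopB, pvDecA, hx, not_le.mp hx, ← hr]
      · simp [pvLoopB, pvDecA, hx, not_le.mp hx, hr, Ne.symm hr, ih]

-- A's chunking loop computes divmod's block list (given enough fuel, depth ≥ 0, divisor ≥ 1).
theorem pvChunkA_eq_divmod (mv : Int) (hmv : 1 ≤ mv) : ∀ (n : Nat) (r : Int), 0 ≤ r → r.toNat ≤ n →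
    pvChunkA mv (n + 1) r
      = List.replicate (r / mv).toNat mv ++ (if r % mv ≠ 0 then [r % mv] else []) := by
  intro n
  induction n with
  | zero =>
    intro r h0 hle
    have hr : r = 0 := by omega
    subst hr
    simp [pvChunkA]
  | succ n ih =>
    intro r h0 hle
    by_cases hz : r = 0
    · subst hz; simp [pvChunkA]
    · by_cases hgt : r > mv
      · have h1 : (0:Int) ≤ r - mv := by omega
        have h2 : (r - mv).toNat ≤ n := by omega
        have hdiv : (r - mv) / mv = r / mv - 1 := by
          have := Int.add_mul_ediv_right r (-1) (show mv ≠ 0 by omega)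
          simpa [sub_eq_add_neg, neg_mul] using this
        have hq1 : 1 ≤ r / mv := by
          rw [Int.le_ediv_iff_mul_le (by omega : (0:Int) < mv)]; omega
        have hmod : (r - mv) % mv = r % mv := Int.sub_emod_right r mv
        have hrep : (r / mv).toNat = ((r - mv) / mv).toNat + 1 := by
          rw [hdiv]; omega
        rw [show pvChunkA mv (n + 1 + 1) r = mv :: pvChunkA mv (n + 1) (r - mv) by
              simp [pvChunkA, hz, hgt],
            ih (r - mv) h1 h2, hmod, hrep, List.replicate_succ, List.cons_append]
      · have hle' : r ≤ mv := by omega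
        by_cases heq : r = mv
        · subst heq
          simp [pvChunkA, hz]
        · have hlt : r < mv := lt_of_le_of_ne hle' heq
          have hdiv0 : r / mv = 0 := Int.ediv_eq_zero_of_lt h0 hlt
          have hmod0 : r % mv = r := Int.emod_eq_of_lt h0 hlt
          simp [pvChunkA, hz, hgt, hdiv0, hmod0]

-- ===== VERDICT (by name: the statement is the Claim_ definition above) =====
theorem get_fifo_split_configs_spec : Claim_equal_get_fifo_split_configs := by
  intro d mq mv _hdom hpre
  unfold Spec_get_fifo_split_configs
  by_cases hd : d ≤ mq
  · simp [get_fifo_split_configs, get_fifo_split_configs_alt, hd]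
  · obtain ⟨hd0, hmv⟩ : 0 ≤ d ∧ 1 ≤ mv := hpre.resolve_left hd
    have hmv0 : mv ≠ 0 := by omega
    have hdm : PySem.Int.divmod? d mv = some (d / mv, d % mv) := by
      simp [PySem.Int.divmod?, hmv0,
        Int.fdiv_eq_ediv_of_nonneg, Int.fmod_eq_emod_of_nonneg, (by omega : (0:Int) ≤ mv)]
    have halt : get_fifo_split_configs_alt d mq mv
        = (List.replicate (d / mv).toNat mv ++ (if d % mv ≠ 0 then [d % mv] else [])).foldl
            (fun acc x => acc ++ pvLoopB mq (x.toNat + 1) x) [] := by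
      simp only [get_fifo_split_configs_alt, if_neg hd, hdm]
    rw [get_fifo_split_configs, if_neg hd, halt,
        pvChunkA_eq_divmod mv hmv d.toNat d hd0 (le_refl _),
        PySem.List.foldl_append_singleton_eq_map, PySem.List.foldl_append_eq_flatMap]
    simp only [List.nil_append, List.map_flatten, List.map_map, List.flatMap_def]
    congr 1
    exact List.map_congr_left (fun x _ => (pvLoopB_eq_map_dec mq (x.toNat + 1) x).symm)
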